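-- pv_equiv track=rewrite | github.com/takoyaki-3/takoyaki3-blog-writer | lambda/workers/generation_worker.py | _split_capture_info
-- ===== SOURCE A (Python) =====
-- from typing import Any, Dict, Optional, Tuple
--
-- def _split_capture_info(body: str) -> Tuple[str, Dict[str, str]]:
--     lines = body.splitlines()
--     capture_index = None
--     for idx, line in enumerate(lines):
--         if line.strip().lower() == "## capture info":
--             capture_index = idx
--             break
--     if capture_index is None:
--         return body.strip(), {}
--
--     capture_lines = []
--     for line in lines[capture_index + 1 :]:
--         stripped = line.strip()
--         if stripped.startswith("## ") or stripped.startswith("# "):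
--             break
--         capture_lines.append(line)
--
--     body_lines = lines[:capture_index]
--     capture_info: Dict[str, str] = {}
--     for line in capture_lines:
--         stripped = line.strip()
--         if stripped.startswith("-"):
--             stripped = stripped[1:].strip()
--         if ":" not in stripped:
--             continue
--         key, value = stripped.split(":", 1)
--         key = key.strip().lower()
--         value = value.strip()
--         if key == "captured_at":
--             capture_info["captured_at"] = value or "unknown"
--         elif key == "location":
--             capture_info["location"] = value or "unspecified"
--
--     return "\n".join(body_lines).strip(), capture_info
-- ===== SOURCE B (Python) =====
-- from typing import Dict, Tuple
--
--
-- def _parse_capture_line(line: str, capture_info: Dict[str, str]) -> None: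
--     stripped = line.strip()
--     if stripped.startswith("-"):
--         stripped = stripped[1:].strip()
--     idx = stripped.find(":")
--     if idx == -1:
--         return
--     key = stripped[:idx].strip().lower()
--     value = stripped[idx + 1:].strip()
--     if key == "captured_at":
--         capture_info["captured_at"] = value or "unknown"
--     elif key == "location":
--         capture_info["location"] = value or "unspecified"
--
--
-- def _split_capture_info(body: str) -> Tuple[str, Dict[str, str]]:
--     # Single pass over the lines with a three-state mode flag.
--     PRE, IN, POST = 0, 1, 2
--     mode = PRE
--     body_lines = []
--     capture_info: Dict[str, str] = {}
--     for line in body.splitlines():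
--         if mode == PRE:
--             if line.strip().lower() == "## capture info":
--                 mode = IN
--             else:
--                 body_lines.append(line)
--         elif mode == IN:
--             stripped = line.strip()
--             if stripped.startswith("## ") or stripped.startswith("# "):
--                 mode = POST
--             else:
--                 _parse_capture_line(line, capture_info)
--         # POST: ignore the rest
--     if mode == PRE:
--         return body.strip(), {}
--     return "\n".join(body_lines).strip(), capture_info
-- ===== Notes on version B (the rewrite author's own statement) =====
-- stated objective: simpler
-- what changed: A's three sequential passes over the lines (find the '## capture info' header, collect section lines until the next heading, then parse the collected lines) are merged into one single pass driven by a three-state mode flag (pre-section / in-section / post-section), with the per-line key:value parsing factored into a helper.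
import Mathlib
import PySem

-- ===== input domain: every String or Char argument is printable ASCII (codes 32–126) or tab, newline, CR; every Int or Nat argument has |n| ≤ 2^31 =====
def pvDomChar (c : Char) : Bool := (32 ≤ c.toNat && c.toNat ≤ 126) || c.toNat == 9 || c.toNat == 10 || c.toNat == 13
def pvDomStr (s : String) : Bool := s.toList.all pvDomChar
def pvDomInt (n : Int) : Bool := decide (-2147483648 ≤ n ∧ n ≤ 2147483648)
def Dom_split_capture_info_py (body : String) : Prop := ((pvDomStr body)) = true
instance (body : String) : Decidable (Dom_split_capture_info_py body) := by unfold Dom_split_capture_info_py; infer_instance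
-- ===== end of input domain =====

-- B merges A's three sequential passes (find header, collect section, parse section) into
-- one pass over the lines with a three-state mode flag (objective: simpler single traversal).

-- ===== PORT A =====
-- first loop of A: enumerate with break, returning the index of the header line
def pvA_findCapture : List String → Nat → Option Nat
  | [], _ => none
  | l :: rest, idx =>
    if PySem.Str.lower (PySem.Str.strip l) == "## capture info" then some idx
    else pvA_findCapture rest (idx + 1)

-- second loop of A: append lines until a heading, then break
def pvA_collect : List String → List String
  | [] => []
  | l :: rest =>
    let stripped := PySem.Str.strip l
    if PySem.Str.startswith stripped "## " || PySem.Str.startswith stripped "# " then []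
    else l :: pvA_collect rest

-- body of A's third loop: parse one capture line into the dict
def pvA_parse (d : PySem.Dict String String) (stripped : String) : PySem.Dict String String :=
  if !(PySem.Str.isIn ":" stripped) then d
  else
    match PySem.Str.splitMax? stripped ":" 1 with
    | some (k :: v :: _) =>
      let key := PySem.Str.lower (PySem.Str.strip k)
      let value := PySem.Str.strip v
      if key == "captured_at" then
        d.insert "captured_at" (if value == "" then "unknown" else value)
      else if key == "location" then
        d.insert "location" (if value == "" then "unspecified" else value)
      else d
    | _ => d

def split_capture_info_py (body : String) : String × (List (String × String)) :=
  let lines := PySem.Str.splitlines body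
  match pvA_findCapture lines 0 with
  | none => (PySem.Str.strip body, [])
  | some captureIndex =>
    let captureLines := pvA_collect (lines.drop (captureIndex + 1))
    let bodyLines := lines.take captureIndex
    let captureInfo : PySem.Dict String String :=
      captureLines.foldl (fun d line =>
        let stripped := PySem.Str.strip line
        let stripped := if PySem.Str.startswith stripped "-"
          then PySem.Str.strip (PySem.Str.slice stripped (some 1) none) else stripped
        pvA_parse d stripped) PySem.Dict.empty
    (PySem.Str.strip (PySem.Str.join "\n" bodyLines), captureInfo.items)

-- ===== PORT B =====
def pvB_parseLine (line : String) (d : PySem.Dict String String) : PySem.Dict String String :=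
  let stripped := PySem.Str.strip line
  let stripped := if PySem.Str.startswith stripped "-"
    then PySem.Str.strip (PySem.Str.slice stripped (some 1) none) else stripped
  let idx := PySem.Str.find stripped ":"
  if idx == -1 then d
  else
    let key := PySem.Str.lower (PySem.Str.strip (PySem.Str.slice stripped none (some idx)))
    let value := PySem.Str.strip (PySem.Str.slice stripped (some (idx + 1)) none)
    if key == "captured_at" then
      d.insert "captured_at" (if value == "" then "unknown" else value)
    else if key == "location" then
      d.insert "location" (if value == "" then "unspecified" else value)
    else d

-- one step of B's single-pass state machine; state = (mode, body_lines, capture_info)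
def pvB_step (st : Nat × List String × PySem.Dict String String) (line : String) :
    Nat × List String × PySem.Dict String String :=
  if st.1 == 0 then
    if PySem.Str.lower (PySem.Str.strip line) == "## capture info" then (1, st.2.1, st.2.2)
    else (0, st.2.1 ++ [line], st.2.2)
  else if st.1 == 1 then
    let stripped := PySem.Str.strip line
    if PySem.Str.startswith stripped "## " || PySem.Str.startswith stripped "# " then
      (2, st.2.1, st.2.2)
    else (1, st.2.1, pvB_parseLine line st.2.2)
  else st

def split_capture_info_py_alt (body : String) : String × (List (String × String)) :=
  let st := (PySem.Str.splitlines body).foldl pvB_step (0, [], PySem.Dict.empty)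
  if st.1 == 0 then (PySem.Str.strip body, [])
  else (PySem.Str.strip (PySem.Str.join "\n" st.2.1), st.2.2.items)

-- ===== PRECONDITION & SPEC =====
def Spec_split_capture_info_py (body : String) (out : String × (List (String × String))) : Prop := out = split_capture_info_py_alt body
instance (body : String) (out : String × (List (String × String))) : Decidable (Spec_split_capture_info_py body out) := by unfold Spec_split_capture_info_py; infer_instance

-- ===== CLAIM (what is proved, stated in full; the proofs are below) =====
def Claim_equal_split_capture_info_py : Prop := ∀ (body : String), Dom_split_capture_info_py body → Spec_split_capture_info_py body (split_capture_info_py body)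

-- ===== LEMMAS AND PROOFS =====

-- once in mode 2 the state machine ignores the rest of the lines
theorem pvB_post (ls : List String) (b : List String) (d : PySem.Dict String String) :
    ls.foldl pvB_step (2, b, d) = (2, b, d) := by
  induction ls with
  | nil => rfl
  | cons l rest ih => simpa [pvB_step] using ih

-- in mode 1 the machine parses exactly the lines A's collect-loop keeps
theorem pvB_in (ls : List String) (b : List String) (d : PySem.Dict String String) :
    ∃ m, (m = 1 ∨ m = 2) ∧
      ls.foldl pvB_step (1, b, d) =
        (m, b, (pvA_collect ls).foldl (fun d line => pvB_parseLine line d) d) := by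
  induction ls generalizing d with
  | nil => exact ⟨1, Or.inl rfl, rfl⟩
  | cons l rest ih =>
    by_cases h : PySem.Chars.startswith (PySem.Chars.strip l.toList) ['#', '#', ' '] = true
        ∨ PySem.Chars.startswith (PySem.Chars.strip l.toList) ['#', ' '] = true
    · exact ⟨2, Or.inr rfl, by simp [pvB_step, pvA_collect, h, pvB_post]⟩
    · obtain ⟨m, hm, heq⟩ := ih (pvB_parseLine l d)
      exact ⟨m, hm, by simp [pvB_step, pvA_collect, h, heq]⟩

-- A's search loop shifts with its index accumulator
theorem pvA_find_shift (ls : List String) (i : Nat) :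
    pvA_findCapture ls (i + 1) = Option.map (· + 1) (pvA_findCapture ls i) := by
  induction ls generalizing i with
  | nil => rfl
  | cons l rest ih =>
    by_cases h : (PySem.Str.lower (PySem.Str.strip l) == "## capture info") = true
    · simp [pvA_findCapture, h]
    · simp [pvA_findCapture, h, ih]

-- main invariant: the single pass from mode 0 computes A's three passes at once
theorem pvB_pre (ls : List String) (b : List String) (d : PySem.Dict String String) :
    (pvA_findCapture ls 0 = none ∧ ls.foldl pvB_step (0, b, d) = (0, b ++ ls, d)) ∨
    (∃ i m, pvA_findCapture ls 0 = some i ∧ (m = 1 ∨ m = 2) ∧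
      ls.foldl pvB_step (0, b, d) =
        (m, b ++ ls.take i,
          (pvA_collect (ls.drop (i + 1))).foldl (fun d line => pvB_parseLine line d) d)) := by
  induction ls generalizing b with
  | nil => exact Or.inl ⟨rfl, by simp⟩
  | cons l rest ih =>
    by_cases h : (PySem.Str.lower (PySem.Str.strip l) == "## capture info") = true
    · refine Or.inr ?_
      obtain ⟨m, hm, heq⟩ := pvB_in rest b d
      exact ⟨0, m, by simp [pvA_findCapture, h], hm, by simp [pvB_step, h, heq]⟩
    · rcases ih (b ++ [l]) with ⟨hfind, heq⟩ | ⟨i, m, hfind, hm, heq⟩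
      · refine Or.inl ⟨?_, ?_⟩
        · simp [pvA_findCapture, h, pvA_find_shift, hfind]
        · simp [pvB_step, h, heq]
      · refine Or.inr ⟨i + 1, m, ?_, hm, ?_⟩
        · simp [pvA_findCapture, h, pvA_find_shift, hfind]
        · simp [pvB_step, h, heq]

-- once the split budget is exhausted (maxsplit reached), the rest is one piece
theorem pvGo_zero (fuel : Nat) (l : List Char) (acc : List (List Char)) :
    PySem.Chars.splitOnMax.go [':'] fuel 0 l [] acc = (l :: acc).reverse := by
  cases fuel <;> cases l <;> rw [PySem.Chars.splitOnMax.go.eq_def] <;> simp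

-- walking over the ':'-free prefix accumulates it, then one split happens
theorem pvGo_walk (pre : List Char) (post cur : List Char) (acc : List (List Char))
    (fuel : Nat) (hpre : ':' ∉ pre) (hfuel : pre.length < fuel) :
    PySem.Chars.splitOnMax.go [':'] fuel 1 (pre ++ ':' :: post) cur acc =
      (post :: (cur.reverse ++ pre) :: acc).reverse := by
  induction pre generalizing cur acc fuel with
  | nil =>
    obtain ⟨f, rfl⟩ : ∃ f, fuel = f + 1 := ⟨fuel - 1, by omega⟩
    rw [PySem.Chars.splitOnMax.go.eq_def]
    simp [List.isPrefixOf, pvGo_zero]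
  | cons p pre ih =>
    obtain ⟨hp, hpre'⟩ : p ≠ ':' ∧ ':' ∉ pre := by
      constructor <;> intro h <;> exact hpre (by simp [h])
    obtain ⟨f, rfl⟩ : ∃ f, fuel = f + 1 := ⟨fuel - 1, by omega⟩
    rw [PySem.Chars.splitOnMax.go.eq_def]
    have hb : ((':' : Char) == p) = false := by
      simp [Ne.symm hp]
    simp only [List.cons_append, List.isPrefixOf, hb, Bool.false_and, if_false, one_ne_zero]
    rw [ih (p :: cur) acc f hpre' (by simpa using hfuel)]
    simp

-- splitting on the first ':' : split(s, ":", 1) = [s[:n], s[n+1:]]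
theorem pvSplitOnMax_eq (sChars : List Char) (n : Nat)
    (h1 : [':'] <+: sChars.drop n) (h2 : ∀ j < n, ¬ [':'] <+: sChars.drop j)
    (hn : n < sChars.length) :
    PySem.Chars.splitOnMax sChars [':'] 1 = [sChars.take n, sChars.drop (n + 1)] := by
  have hget : sChars[n] = ':' := by
    rw [List.drop_eq_getElem_cons hn] at h1
    exact (List.cons_prefix_cons.mp h1).1.symm
  have hdecomp : sChars = sChars.take n ++ ':' :: sChars.drop (n + 1) := by
    conv_lhs => rw [← List.take_append_drop n sChars]
    rw [List.drop_eq_getElem_cons hn, hget]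
  have hnot : ':' ∉ sChars.take n := by
    intro hmem
    obtain ⟨j, hj, hje⟩ := List.getElem_of_mem hmem
    rw [List.length_take] at hj
    have hjn : j < n := by omega
    have hjs : j < sChars.length := by omega
    refine h2 j hjn ⟨sChars.drop (j + 1), ?_⟩
    have hgj : sChars[j] = ':' := by simpa [List.getElem_take] using hje
    rw [List.drop_eq_getElem_cons hjs, hgj]
    rfl
  have hlen : (sChars.take n).length < sChars.length + 1 := by
    rw [List.length_take]; omega
  unfold PySem.Chars.splitOnMax
  rw [if_neg (by norm_num)]
  conv_lhs => rw [show (1 : Int).toNat = 1 from rfl]; rw [hdecomp]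
  rw [pvGo_walk _ _ _ _ _ hnot (by simpa using hlen)]
  simp

-- A's split(":", 1) branch equals B's find-and-slice branch, per stripped line
theorem pvParseCore_eq (d : PySem.Dict String String) (st : String) :
    pvA_parse d st =
    (let idx := PySem.Str.find st ":"
     if idx == -1 then d
     else
       let key := PySem.Str.lower (PySem.Str.strip (PySem.Str.slice st none (some idx)))
       let value := PySem.Str.strip (PySem.Str.slice st (some (idx + 1)) none)
       if key == "captured_at" then
         d.insert "captured_at" (if value == "" then "unknown" else value)
       else if key == "location" then
         d.insert "location" (if value == "" then "unspecified" else value)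
       else d) := by
  unfold pvA_parse
  have hcolon : (":" : String).toList = [':'] := rfl
  by_cases hin : PySem.Str.isIn ":" st = true
  · -- ':' occurs: find it, characterize the split
    have hfind : PySem.Chars.find st.toList [':'] ≠ -1 := by
      have := hin
      simp only [PySem.Str.isIn, hcolon, PySem.Chars.isIn, bne_iff_ne, ne_eq] at this
      exact this
    have hnonneg : 0 ≤ PySem.Chars.find st.toList [':'] := by
      rw [PySem.Chars.find_nonneg_iff]
      exact (PySem.Chars.isIn_iff_infix _ _).mp (by simpa [PySem.Str.isIn, hcolon] using hin)
    set i := PySem.Chars.find st.toList [':'] with hi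
    set n := i.toNat with hn
    have hspec := PySem.Chars.findFrom_natCast_spec st.toList [':'] 0 (by simp)
      (by rw [Nat.cast_zero, PySem.Chars.findFrom_zero]; exact hfind)
    rw [Nat.cast_zero, PySem.Chars.findFrom_zero, ← hi] at hspec
    obtain ⟨-, hpref, hmin⟩ := hspec
    have hnlen : n < st.toList.length := by
      have hne : st.toList.drop n ≠ [] := by
        intro hnil
        rw [hnil] at hpref
        simpa using hpref.length_le
      have := List.length_drop (l := st.toList) (i := n)
      have hpos : 0 < (st.toList.drop n).length := List.length_pos_of_ne_nil hne
      omega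
    have hsplit : PySem.Chars.splitOnMax st.toList [':'] 1 =
        [st.toList.take n, st.toList.drop (n + 1)] :=
      pvSplitOnMax_eq st.toList n hpref (fun j hj => hmin j (Nat.zero_le j) hj) hnlen
    have hsplitS : PySem.Str.splitMax? st ":" 1 =
        some [String.ofList (st.toList.take n), String.ofList (st.toList.drop (n + 1))] := by
      simp [PySem.Str.splitMax?, PySem.Chars.splitMax?, hcolon, hsplit]
    have hkey : PySem.Str.slice st none (some i) = String.ofList (st.toList.take n) := by
      simp [PySem.Str.slice, PySem.Chars.slice, PySem.List.slice_to _ hnonneg, hn]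
    have hval : PySem.Str.slice st (some (i + 1)) none = String.ofList (st.toList.drop (n + 1)) := by
      have : (i + 1).toNat = n + 1 := by omega
      simp [PySem.Str.slice, PySem.Chars.slice, PySem.List.slice_from _ (by omega : (0:Int) ≤ i + 1), this]
    have hfindS : PySem.Str.find st ":" = i := by
      rw [hi]; simp [PySem.Str.find, hcolon]
    have hne : (i == -1) = false := by simpa using hfind
    simp only [hin, Bool.not_true, if_false, hsplitS, hfindS, hne, hkey, hval,
      Bool.false_eq_true]
  · -- no ':' : both sides leave the dict unchanged
    have hfind : PySem.Chars.find st.toList [':'] = -1 := by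
      have := hin
      simp only [PySem.Str.isIn, hcolon, PySem.Chars.isIn, bne_iff_ne, ne_eq, not_not] at this
      exact this
    have hinF : PySem.Chars.isIn [':'] st.toList = false := by
      simpa [PySem.Str.isIn, hcolon] using hin
    simp [hinF, PySem.Str.find, hcolon, hfind]

-- pointwise form of pvParseCore_eq, shaped like A's loop body
theorem pvParse_eq (d : PySem.Dict String String) (line : String) :
    (let stripped := PySem.Str.strip line
     let stripped := if PySem.Str.startswith stripped "-"
       then PySem.Str.strip (PySem.Str.slice stripped (some 1) none) else stripped
     pvA_parse d stripped) = pvB_parseLine line d :=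
  pvParseCore_eq d (if PySem.Str.startswith (PySem.Str.strip line) "-"
    then PySem.Str.strip (PySem.Str.slice (PySem.Str.strip line) (some 1) none)
    else PySem.Str.strip line)

-- the two folds over the capture lines build the same dict
theorem pvA_dict_eq (ls : List String) (d : PySem.Dict String String) :
    ls.foldl (fun d line =>
      let stripped := PySem.Str.strip line
      let stripped := if PySem.Str.startswith stripped "-"
        then PySem.Str.strip (PySem.Str.slice stripped (some 1) none) else stripped
      pvA_parse d stripped) d = ls.foldl (fun d line => pvB_parseLine line d) d :=
  PySem.List.foldl_congr_mem _ _ _ _ (fun acc x _ => pvParse_eq acc x)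

-- ===== VERDICT (by name: the statement is the Claim_ definition above) =====
set_option maxHeartbeats 1600000 in
theorem split_capture_info_py_spec : Claim_equal_split_capture_info_py := by
  intro body _
  unfold Spec_split_capture_info_py split_capture_info_py split_capture_info_py_alt
  rcases pvB_pre (PySem.Str.splitlines body) [] PySem.Dict.empty with ⟨hfind, heq⟩ | ⟨i, m, hfind, hm, heq⟩
  · simp only [hfind, heq]
    rfl
  · have hm0 : (m == 0) = false := by rcases hm with h | h <;> simp [h]
    simp only [hfind, heq]
    rw [pvA_dict_eq]
    simp only [hm0, Bool.false_eq_true, if_false, List.nil_append]
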